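-- pv_equiv track=rewrite | github.com/Nyaaa/advent-of-code | year_2017/day_04/day04.py | part_2
-- ===== SOURCE A (Python) =====
-- from collections import Counter
-- from itertools import combinations
--
-- def part_2(data: list[str]) -> int:
--     result = 0
--     for line in data:
--         words = line.split()
--         if Counter(words).most_common(1)[0][1] == 1 and \
--                 all(Counter(a) != Counter(b) for a, b in combinations(words, 2)):
--             result += 1
--     return result
-- ===== SOURCE B (Python) =====
-- def part_2(data: list[str]) -> int:
--     result = 0
--     for line in data:
--         words = line.split()
--         canon = {''.join(sorted(w)) for w in words}
--         if len(canon) == len(words):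
--             result += 1
--     return result
-- ===== Notes on version B (the rewrite author's own statement) =====
-- stated objective: faster
-- what changed: Instead of comparing letter Counters of every pair of words (and a separate duplicate check), B canonicalizes each word once (sorted letters) and counts the line iff the set of canonical forms is as large as the word list.
import Mathlib
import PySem

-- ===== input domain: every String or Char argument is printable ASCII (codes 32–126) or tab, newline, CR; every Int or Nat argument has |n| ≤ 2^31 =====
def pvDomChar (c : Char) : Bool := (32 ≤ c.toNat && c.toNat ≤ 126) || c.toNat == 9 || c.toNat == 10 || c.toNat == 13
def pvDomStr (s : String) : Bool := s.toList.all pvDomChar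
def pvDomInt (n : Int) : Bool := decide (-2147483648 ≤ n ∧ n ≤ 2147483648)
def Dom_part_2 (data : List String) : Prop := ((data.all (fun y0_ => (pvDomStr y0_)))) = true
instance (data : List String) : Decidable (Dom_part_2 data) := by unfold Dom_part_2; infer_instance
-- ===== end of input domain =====

-- ===== PORT A =====
-- B is a faster exact re-implementation (canonical forms instead of pairwise Counter comparison);
-- equivalence is proved on Pre_: inputs whose lines all contain at least one word (elsewhere A raises).

-- Python's 'Counter(a) == Counter(b)' (dict equality: same keys, same counts; counts here are never 0)
def pvCounterEq (d1 d2 : PySem.Dict Char Int) : Bool :=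
  (d1.keys.all (fun k => d1.getD k 0 == d2.getD k 0)) &&
  (d2.keys.all (fun k => d2.getD k 0 == d1.getD k 0))

def part_2 (data : List String) : Int :=
  data.foldl (fun result line =>
    let words := PySem.Str.split₀ line
    -- most_common(1)[0][1] is the maximal count; on an empty Counter Python raises IndexError (none branch, excluded by Pre_)
    match PySem.List.max? (PySem.Dict.counter words).values (fun v => v) with
    | none => result
    | some m =>
      if m == 1 &&
          ((PySem.List.combinations words 2).all (fun p =>
            match p with
            | [a, b] => !(pvCounterEq (PySem.Dict.counter a.toList) (PySem.Dict.counter b.toList))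
            | _ => true))
      then result + 1 else result) 0

-- ===== PORT B =====
-- ''.join(sorted(w))
def pvCanon (w : String) : List Char := PySem.List.sorted w.toList (fun c => c) false

def part_2_alt (data : List String) : Int :=
  data.foldl (fun result line =>
    let words := PySem.Str.split₀ line
    let canon : PySem.Set (List Char) := PySem.Set.ofList (words.map pvCanon)
    if canon.length == words.length then result + 1 else result) 0

-- ===== PRECONDITION & SPEC =====
-- Pre_ excludes exactly the inputs on which A raises IndexError: a line whose split() is empty.
def Pre_part_2 (data : List String) : Prop :=
  ∀ line ∈ data, PySem.Str.split₀ line ≠ []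
instance (data : List String) : Decidable (Pre_part_2 data) := by unfold Pre_part_2; infer_instance
def pvWitness_part_2 : List String := ["ab ba c", "a b c"]

def Spec_part_2 (data : List String) (out : Int) : Prop := out = part_2_alt data
instance (data : List String) (out : Int) : Decidable (Spec_part_2 data out) := by unfold Spec_part_2; infer_instance

-- ===== CLAIM (what is proved, stated in full; the proofs are below) =====
def Claim_equal_part_2 : Prop := ∀ (data : List String), Dom_part_2 data → Pre_part_2 data → Spec_part_2 data (part_2 data)

-- ===== LEMMAS AND PROOFS =====

lemma pvCounterEq_iff (a b : List Char) :
    pvCounterEq (PySem.Dict.counter a) (PySem.Dict.counter b) = true ↔ a.Perm b := by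
  unfold pvCounterEq
  simp only [Bool.and_eq_true, List.all_eq_true, PySem.Dict.keys_counter,
    PySem.Set.mem_ofList, PySem.Dict.getD_counter, beq_iff_eq]
  rw [List.perm_iff_count]
  constructor
  · rintro ⟨h1, h2⟩ c
    by_cases hca : c ∈ a
    · exact_mod_cast h1 c hca
    · by_cases hcb : c ∈ b
      · exact_mod_cast (h2 c hcb).symm
      · rw [List.count_eq_zero_of_not_mem hca, List.count_eq_zero_of_not_mem hcb]
  · intro h
    exact ⟨fun c _ => by exact_mod_cast h c, fun c _ => by exact_mod_cast (h c).symm⟩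

lemma pvCanon_eq_iff (a b : String) : pvCanon a = pvCanon b ↔ a.toList.Perm b.toList := by
  simp [pvCanon, PySem.List.sorted_id_eq_sorted_id_iff_perm]

lemma set_ofList_length_eq_iff {α : Type} [DecidableEq α] [BEq α] [LawfulBEq α] (l : List α) :
    (PySem.Set.ofList l).length = l.length ↔ l.Nodup := by
  constructor
  · intro h
    have hperm : (PySem.Set.ofList l).Perm l.dedup :=
      (List.perm_ext_iff_of_nodup (PySem.Set.nodup_ofList l) l.nodup_dedup).mpr
        (fun a => by rw [PySem.Set.mem_ofList, List.mem_dedup])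
    have := hperm.length_eq
    have hd : l.dedup = l := List.Sublist.eq_of_length (List.dedup_sublist l) (by omega)
    rw [← hd]; exact l.nodup_dedup
  · intro h
    exact ((List.perm_ext_iff_of_nodup (PySem.Set.nodup_ofList l) h).mpr
      (fun a => PySem.Set.mem_ofList l a)).length_eq

lemma max_counter_isSome (words : List String) (h : words ≠ []) :
    (PySem.List.max? (PySem.Dict.counter words).values (fun v => v)).isSome := by
  cases hm : PySem.List.max? (PySem.Dict.counter words).values (fun v => v) with
  | some m => rfl
  | none =>
    exfalso
    have hv := (PySem.List.max?_eq_none_iff _ (fun v => v)).mp hm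
    obtain ⟨w, hw⟩ := List.exists_mem_of_ne_nil words h
    have : w ∈ (PySem.Dict.counter words).keys := by
      rw [PySem.Dict.keys_counter, PySem.Set.mem_ofList]; exact hw
    have hk : (PySem.Dict.counter words).keys = [] := by
      have := PySem.Dict.values_eq_map_keys (PySem.Dict.counter words) (PySem.Dict.nodup_keys_counter words) 0
      rw [this] at hv
      exact List.map_eq_nil_iff.mp hv
    rw [hk] at this; exact (List.not_mem_nil) this

lemma max_counter_eq_one_iff (words : List String) (m : Int)
    (hm : PySem.List.max? (PySem.Dict.counter words).values (fun v => v) = some m) :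
    (m = 1 ↔ words.Nodup) := by
  have hisMax := PySem.List.max?_isMax hm
  have hmem := PySem.List.max?_mem hm
  have hvals : (PySem.Dict.counter words).values
      = (PySem.Set.ofList words).map (fun k => (words.count k : Int)) := by
    rw [PySem.Dict.values_eq_map_keys (PySem.Dict.counter words) (PySem.Dict.nodup_keys_counter words) 0,
      PySem.Dict.keys_counter]
    exact List.map_congr_left (fun k _ => PySem.Dict.getD_counter words k)
  rw [hvals] at hisMax hmem
  rw [List.nodup_iff_count_eq_one]
  constructor
  · intro h1 w hw
    have hle : (words.count w : Int) ≤ m := by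
      apply hisMax
      exact List.mem_map.mpr ⟨w, (PySem.Set.mem_ofList words w).mpr hw, rfl⟩
    have hpos : 0 < words.count w := List.count_pos_iff.mpr hw
    omega
  · intro h
    obtain ⟨k, hk, hkm⟩ := List.mem_map.mp hmem
    rw [← hkm, h k ((PySem.Set.mem_ofList words k).mp hk)]; rfl

lemma combinations_all_iff (words : List String) :
    ((PySem.List.combinations words 2).all (fun p =>
        match p with
        | [a, b] => !(pvCounterEq (PySem.Dict.counter a.toList) (PySem.Dict.counter b.toList))
        | _ => true)) = true
      ↔ words.Pairwise (fun a b => ¬ a.toList.Perm b.toList) := by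
  rw [List.all_eq_true, List.pairwise_iff_forall_sublist]
  constructor
  · intro h a b hsub
    have hx := h [a, b] ((PySem.List.mem_combinations_iff words 2 [a, b]).mpr ⟨hsub, rfl⟩)
    rw [Bool.not_eq_true'] at hx
    rw [← pvCounterEq_iff]
    simp [hx]
  · intro h p hp
    obtain ⟨hsub, hlen⟩ := (PySem.List.mem_combinations_iff words 2 p).mp hp
    match p, hlen with
    | [a, b], _ =>
      rw [Bool.not_eq_true', Bool.eq_false_iff, ne_eq, pvCounterEq_iff]
      exact h hsub

lemma step_eq (line : String) (h : PySem.Str.split₀ line ≠ []) (result : Int) :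
    (let words := PySem.Str.split₀ line
     match PySem.List.max? (PySem.Dict.counter words).values (fun v => v) with
     | none => result
     | some m =>
       if m == 1 &&
           ((PySem.List.combinations words 2).all (fun p =>
             match p with
             | [a, b] => !(pvCounterEq (PySem.Dict.counter a.toList) (PySem.Dict.counter b.toList))
             | _ => true))
       then result + 1 else result)
    = (let words := PySem.Str.split₀ line
       if (PySem.Set.ofList (words.map pvCanon)).length == words.length then result + 1 else result) := by
  set words := PySem.Str.split₀ line with hw
  obtain ⟨m, hm⟩ := Option.isSome_iff_exists.mp (max_counter_isSome words h)
  simp only [hm]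
  have hiff : (m == 1 &&
      ((PySem.List.combinations words 2).all (fun p =>
        match p with
        | [a, b] => !(pvCounterEq (PySem.Dict.counter a.toList) (PySem.Dict.counter b.toList))
        | _ => true))) = true
      ↔ ((PySem.Set.ofList (words.map pvCanon)).length == words.length) = true := by
    rw [Bool.and_eq_true, beq_iff_eq, combinations_all_iff, beq_iff_eq,
      ← List.length_map (f := pvCanon), set_ofList_length_eq_iff]
    have hnodup : (words.map pvCanon).Nodup ↔ words.Pairwise (fun a b => ¬ a.toList.Perm b.toList) := by
      rw [List.Nodup, List.pairwise_map]
      constructor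
      · exact fun hp => hp.imp (fun hne hperm => hne ((pvCanon_eq_iff _ _).mpr hperm))
      · exact fun hp => hp.imp (fun hnp heq => hnp ((pvCanon_eq_iff _ _).mp heq))
    rw [hnodup]
    constructor
    · exact fun ⟨_, hp⟩ => hp
    · intro hp
      refine ⟨(max_counter_eq_one_iff words m hm).mpr ?_, hp⟩
      rw [List.Nodup]
      exact hp.imp (fun hab heq => hab (by simp [heq]))
  have hcond : (m == 1 &&
      ((PySem.List.combinations words 2).all (fun p =>
        match p with
        | [a, b] => !(pvCounterEq (PySem.Dict.counter a.toList) (PySem.Dict.counter b.toList))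
        | _ => true)))
      = ((PySem.Set.ofList (words.map pvCanon)).length == words.length) := by
    rw [Bool.eq_iff_iff]
    exact_mod_cast hiff
  rw [hcond]

-- ===== VERDICT (by name: the statement is the Claim_ definition above) =====
theorem part_2_spec : Claim_equal_part_2 := by
  intro data _ hpre
  unfold Spec_part_2 part_2 part_2_alt
  apply PySem.List.foldl_congr_mem
  intro acc line hline
  exact step_eq line (hpre line hline) acc
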